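-- pv_equiv track=rewrite | github.com/alarxx/KMGLift | prod/data_wrapper.py | __operations_time
-- ===== SOURCE A (Python) =====
-- def __operations_time(values):
--     periods = []
--     # Сложнаватая логика, пересмотреть!
--     isClose = True
--     start = 0
--     for i in range(len(values)):
--         if values[i] == 0:
--             if not isClose:
--                 periods.append([start, i])
--             isClose = True
--         elif isClose:
--             isClose = False
--             start = i
--
--     if not isClose:
--         periods.append([start, len(values)])
--
--     return periods
-- ===== SOURCE B (Python) =====
-- def __operations_time(values):
--     # Run-grouping: scan maximal runs of equal "non-zero" key with two pointers,
--     # emitting [i, j] for each non-zero run.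
--     periods = []
--     i, n = 0, len(values)
--     while i < n:
--         nz = values[i] != 0
--         j = i + 1
--         while j < n and (values[j] != 0) == nz:
--             j += 1
--         if nz:
--             periods.append([i, j])
--         i = j
--     return periods
-- ===== Notes on version B (the rewrite author's own statement) =====
-- stated objective: alternative
-- what changed: Replaces A's per-element isClose/start state machine with trailing flush by a two-pointer run-grouper that scans each maximal run of equal non-zero key and emits [i, j] for non-zero runs directly.
import Mathlib
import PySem

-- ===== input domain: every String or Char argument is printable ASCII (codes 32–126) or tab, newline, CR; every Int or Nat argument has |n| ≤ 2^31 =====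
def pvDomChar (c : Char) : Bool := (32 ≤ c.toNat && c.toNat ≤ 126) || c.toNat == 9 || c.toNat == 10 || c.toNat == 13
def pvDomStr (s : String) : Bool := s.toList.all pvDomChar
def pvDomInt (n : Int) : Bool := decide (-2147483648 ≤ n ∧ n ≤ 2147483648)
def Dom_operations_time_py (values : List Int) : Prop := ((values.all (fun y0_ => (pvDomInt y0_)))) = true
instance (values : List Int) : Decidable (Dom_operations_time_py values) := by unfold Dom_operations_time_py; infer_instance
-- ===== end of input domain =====

-- B replaces A's per-element isClose/start state machine (with trailing flush) by a
-- two-pointer run-grouper over maximal runs of equal non-zero key; same O(n) cost.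

-- ===== PORT A =====
-- A's loop over range(len(values)) with values[i], carried as recursion over the list
-- with the index i and the state (periods, isClose, start); branches in A's order.
def operations_time_py_go (xs : List Int) (i : Int) (isClose : Bool) (start : Int)
    (periods : List (List Int)) : List (List Int) :=
  match xs with
  | [] => if !isClose then periods ++ [[start, i]] else periods
  | v :: rest =>
    if v = 0 then
      operations_time_py_go rest (i + 1) true start
        (if !isClose then periods ++ [[start, i]] else periods)
    else if isClose then
      operations_time_py_go rest (i + 1) false i periods
    else
      operations_time_py_go rest (i + 1) false start periods

def operations_time_py (values : List Int) : List (List Int) :=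
  operations_time_py_go values 0 true 0 []

-- ===== PORT B =====
-- B's outer while: at the head of each maximal run with key (x != 0), the inner while
-- (a takeWhile on equal key) finds its extent; emit [i, i+len] when the key is non-zero.
def operations_time_py_alt_go (xs : List Int) (i : Int) : List (List Int) :=
  match xs with
  | [] => []
  | x :: rest =>
    let run := rest.takeWhile (fun y => (y != 0) == (x != 0))
    let len : Int := 1 + run.length
    let tail := rest.drop run.length
    if x != 0 then [i, i + len] :: operations_time_py_alt_go tail (i + len)
    else operations_time_py_alt_go tail (i + len)
termination_by xs.length
decreasing_by
  all_goals simp only [List.length_drop, List.length_cons]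
  all_goals omega

def operations_time_py_alt (values : List Int) : List (List Int) :=
  operations_time_py_alt_go values 0

-- ===== PRECONDITION & SPEC =====
def Spec_operations_time_py (values : List Int) (out : List (List Int)) : Prop := out = operations_time_py_alt values
instance (values : List Int) (out : List (List Int)) : Decidable (Spec_operations_time_py values out) := by unfold Spec_operations_time_py; infer_instance

-- ===== CLAIM (what is proved, stated in full; the proofs are below) =====
def Claim_equal_operations_time_py : Prop := ∀ (values : List Int), Dom_operations_time_py values → Spec_operations_time_py values (operations_time_py values)

-- ===== LEMMAS AND PROOFS =====

-- skipping a single leading zero: B's run-grouper absorbs it into the zero run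
lemma alt_go_zero_cons (rest : List Int) (i : Int) :
    operations_time_py_alt_go (0 :: rest) i = operations_time_py_alt_go rest (i + 1) := by
  cases rest with
  | nil => rw [operations_time_py_alt_go]; simp [operations_time_py_alt_go]
  | cons y rest' =>
    by_cases hy : y = 0
    · subst hy
      rw [operations_time_py_alt_go]
      conv_rhs => rw [operations_time_py_alt_go]
      simp only [List.takeWhile, bne_self_eq_false, beq_self_eq_true, List.length_cons,
        List.drop_succ_cons]
      simp
      congr 1
      ring
    · have hyb : (y != 0) = true := by simp [hy]
      rw [operations_time_py_alt_go]
      simp [List.takeWhile, hyb]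

-- the combined invariant for A's state machine: in the closed state A from here equals B from
-- here; in the open state with pending start s, A emits [s, i + (leading non-zero run length)]
-- and continues as B past that run.
lemma go_invariant (xs : List Int) :
    (∀ (i start : Int) (p : List (List Int)),
        operations_time_py_go xs i true start p = p ++ operations_time_py_alt_go xs i) ∧
    (∀ (i s : Int) (p : List (List Int)),
        operations_time_py_go xs i false s p =
          p ++ [[s, i + ((xs.takeWhile (fun y => y != 0)).length : Int)]]
            ++ operations_time_py_alt_go (xs.drop (xs.takeWhile (fun y => y != 0)).length)
                 (i + ((xs.takeWhile (fun y => y != 0)).length : Int))) := by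
  induction xs with
  | nil => simp [operations_time_py_go, operations_time_py_alt_go]
  | cons x rest ih =>
    obtain ⟨ihC, ihO⟩ := ih
    constructor
    · intro i start p
      by_cases hx : x = 0
      · subst hx
        have step : operations_time_py_go (0 :: rest) i true start p
            = operations_time_py_go rest (i + 1) true start p := by
          rw [operations_time_py_go]; simp
        rw [step, ihC, alt_go_zero_cons]
      · have hxne : (x != 0) = true := by simp [hx]
        have step : operations_time_py_go (x :: rest) i true start p
            = operations_time_py_go rest (i + 1) false i p := by
          rw [operations_time_py_go]; simp [hx]
        rw [step, ihO]
        conv_rhs => rw [operations_time_py_alt_go]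
        simp only [hxne, if_true, List.append_assoc,
          List.singleton_append]
        have h1 : i + 1 + ((rest.takeWhile (fun y : Int => y != 0)).length : Int)
            = i + (1 + ((rest.takeWhile (fun y : Int => y != 0)).length : Int)) := by ring
        rw [h1]
        simp only [beq_true]
    · intro i s p
      by_cases hx : x = 0
      · subst hx
        have step : operations_time_py_go (0 :: rest) i false s p
            = operations_time_py_go rest (i + 1) true s (p ++ [[s, i]]) := by
          rw [operations_time_py_go]; simp
        rw [step, ihC, ← alt_go_zero_cons]
        simp [List.takeWhile]
      · have step : operations_time_py_go (x :: rest) i false s p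
            = operations_time_py_go rest (i + 1) false s p := by
          rw [operations_time_py_go]; simp [hx]
        rw [step, ihO]
        have hxne : (x != 0) = true := by simp [hx]
        simp only [List.takeWhile, hxne, List.length_cons, List.drop_succ_cons]
        have h1 : i + 1 + ((rest.takeWhile (fun y => y != 0)).length : Int)
            = i + (((rest.takeWhile (fun y => y != 0)).length + 1 : Nat) : Int) := by
          push_cast; ring
        rw [h1]

-- ===== VERDICT (by name: the statement is the Claim_ definition above) =====
theorem operations_time_py_spec : Claim_equal_operations_time_py := by
  intro values _
  unfold Spec_operations_time_py operations_time_py operations_time_py_alt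
  exact (go_invariant values).1 0 0 []
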